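-- pv_equiv track=rewrite | github.com/decordoba/PygletPlayground | Older test0/examples/template_easy.py | get_increase_from_keys_used
-- ===== SOURCE A (Python) =====
-- def get_increase_from_keys_used(keys_used):
--     horizontal_increase = 0
--     vertical_increase = 0
--     rotate = False
--     for key in keys_used:
--         if key == "L":
--             horizontal_increase += -1
--         elif key == "R":
--             horizontal_increase += 1
--         elif key == "D":
--             vertical_increase += -1
--         elif key == "U":
--             rotate = True
--     return horizontal_increase, vertical_increase, rotate
-- ===== SOURCE B (Python) =====
-- def get_increase_from_keys_used(keys_used):
--     return (keys_used.count("R") - keys_used.count("L"),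
--             -keys_used.count("D"),
--             "U" in keys_used)
-- ===== Notes on version B (the rewrite author's own statement) =====
-- stated objective: simpler
-- what changed: Replaced the single branching loop with three accumulators by direct aggregate scans: two count calls per axis, a negated count for vertical, and a membership test for rotate.
import Mathlib
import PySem

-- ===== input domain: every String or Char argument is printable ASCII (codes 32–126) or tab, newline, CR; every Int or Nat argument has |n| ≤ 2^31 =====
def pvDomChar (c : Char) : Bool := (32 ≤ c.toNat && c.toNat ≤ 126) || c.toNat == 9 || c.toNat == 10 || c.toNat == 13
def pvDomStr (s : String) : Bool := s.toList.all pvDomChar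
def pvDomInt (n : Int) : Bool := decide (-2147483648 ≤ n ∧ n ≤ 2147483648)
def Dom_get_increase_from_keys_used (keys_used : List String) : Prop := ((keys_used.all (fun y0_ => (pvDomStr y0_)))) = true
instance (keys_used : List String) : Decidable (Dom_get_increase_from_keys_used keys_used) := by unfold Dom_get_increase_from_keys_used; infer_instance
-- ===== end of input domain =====

-- ===== PORT A =====
-- loop body of A (the if/elif chain updating the three accumulators)
def pvStepA (st : Int × Int × Bool) (key : String) : Int × Int × Bool :=
  let (h, v, r) := st
  if key == "L" then (h + (-1), v, r)
  else if key == "R" then (h + 1, v, r)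
  else if key == "D" then (h, v + (-1), r)
  else if key == "U" then (h, v, true)
  else (h, v, r)

def get_increase_from_keys_used (keys_used : List String) : Int × Int × Bool :=
  keys_used.foldl pvStepA (0, 0, false)

-- ===== PORT B =====
-- B: three aggregate scans (counts and a membership test) instead of one branching loop.
def get_increase_from_keys_used_alt (keys_used : List String) : Int × Int × Bool :=
  ((PySem.List.count keys_used "R" : Int) - (PySem.List.count keys_used "L" : Int),
   -(PySem.List.count keys_used "D" : Int),
   keys_used.contains "U")

-- ===== PRECONDITION & SPEC =====
def Spec_get_increase_from_keys_used (keys_used : List String) (out : Int × Int × Bool) : Prop := out = get_increase_from_keys_used_alt keys_used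
instance (keys_used : List String) (out : Int × Int × Bool) : Decidable (Spec_get_increase_from_keys_used keys_used out) := by unfold Spec_get_increase_from_keys_used; infer_instance

-- ===== CLAIM (what is proved, stated in full; the proofs are below) =====
def Claim_equal_get_increase_from_keys_used : Prop := ∀ (keys_used : List String), Dom_get_increase_from_keys_used keys_used → Spec_get_increase_from_keys_used keys_used (get_increase_from_keys_used keys_used)

-- ===== LEMMAS AND PROOFS =====

-- ===== VERDICT (by name: the statement is the Claim_ definition above) =====
-- loop invariant: the fold from any state adds the counts / ors the membership
lemma pv_fold_inv (keys_used : List String) (h v : Int) (r : Bool) :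
    keys_used.foldl pvStepA (h, v, r)
    = (h + (PySem.List.count keys_used "R" : Int) - (PySem.List.count keys_used "L" : Int),
       v - (PySem.List.count keys_used "D" : Int),
       r || keys_used.contains "U") := by
  induction keys_used generalizing h v r with
  | nil => simp [PySem.List.count]
  | cons x xs ih =>
    rw [List.foldl_cons]
    by_cases hL : x = "L"
    · subst hL
      rw [show pvStepA (h, v, r) "L" = (h + (-1), v, r) from rfl, ih]
      simp [PySem.List.count]
      omega
    · by_cases hR : x = "R"
      · subst hR
        rw [show pvStepA (h, v, r) "R" = (h + 1, v, r) from rfl, ih]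
        simp [PySem.List.count]
        omega
      · by_cases hD : x = "D"
        · subst hD
          rw [show pvStepA (h, v, r) "D" = (h, v + (-1), r) from rfl, ih]
          simp [PySem.List.count]
          omega
        · by_cases hU : x = "U"
          · subst hU
            rw [show pvStepA (h, v, r) "U" = (h, v, true) from rfl, ih]
            simp [PySem.List.count, hL, hR, hD]
          · rw [show pvStepA (h, v, r) x = (h, v, r) from by simp [pvStepA, hL, hR, hD, hU], ih]
            simp [PySem.List.count, hL, hR, hD, Ne.symm hU]

theorem get_increase_from_keys_used_spec : Claim_equal_get_increase_from_keys_used := by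
  intro keys_used _
  show get_increase_from_keys_used keys_used = _
  unfold get_increase_from_keys_used get_increase_from_keys_used_alt
  rw [pv_fold_inv]
  simp
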